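-- pv_equiv track=rewrite | github.com/talawakelle/yield_analysis | backend/app/services/chart_service.py | get_estate_colors
-- ===== SOURCE A (Python) =====
-- DEFAULT_PALETTE = [
--     "#d95f57",  # red
--     "#d3ca55",  # mustard
--     "#71d34f",  # green
--     "#58cfa0",  # teal
--     "#5a95d1",  # blue
--     "#8257d2",  # purple
--     "#d056c0",  # magenta
-- ]
--
-- FIXED_ESTATE_COLORS = {
--     "Bearwell": "#d95f57",
--     "Holyrood": "#d3ca55",
--     "GreatWestern": "#71d34f",
--     "Logie": "#58cfa0",
--     "Mattakelle": "#5a95d1",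
--     "Palmerston": "#8257d2",
--     "Wattegoda": "#d056c0",
-- }
--
-- def _palette_for_region(region: str) -> list[str]:
--     return DEFAULT_PALETTE
--
-- def _fixed_color_lookup(region: str) -> dict[str, str]:
--     return FIXED_ESTATE_COLORS
--
-- def get_estate_colors(estate_order: list[str], region: str) -> dict[str, str]:
--     colors: dict[str, str] = {}
--     palette = _palette_for_region(region)
--     fixed = _fixed_color_lookup(region)
--     next_idx = 0
--
--     for estate in estate_order:
--         if estate in fixed:
--             colors[estate] = fixed[estate]
--         else:
--             colors[estate] = palette[next_idx % len(palette)]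
--             next_idx += 1
--
--     return colors
-- ===== SOURCE B (Python) =====
-- DEFAULT_PALETTE = [
--     "#d95f57",  # red
--     "#d3ca55",  # mustard
--     "#71d34f",  # green
--     "#58cfa0",  # teal
--     "#5a95d1",  # blue
--     "#8257d2",  # purple
--     "#d056c0",  # magenta
-- ]
--
-- FIXED_ESTATE_COLORS = {
--     "Bearwell": "#d95f57",
--     "Holyrood": "#d3ca55",
--     "GreatWestern": "#71d34f",
--     "Logie": "#58cfa0",
--     "Mattakelle": "#5a95d1",
--     "Palmerston": "#8257d2",
--     "Wattegoda": "#d056c0",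
-- }
--
-- def _palette_for_region(region: str) -> list[str]:
--     return DEFAULT_PALETTE
--
-- def _fixed_color_lookup(region: str) -> dict[str, str]:
--     return FIXED_ESTATE_COLORS
--
-- def get_estate_colors(estate_order: list[str], region: str) -> dict[str, str]:
--     palette = _palette_for_region(region)
--     fixed = _fixed_color_lookup(region)
--     # pass 1: rank of each position = number of non-fixed estates strictly before it
--     ranks = []
--     r = 0
--     for e in estate_order:
--         ranks.append(r)
--         r += e not in fixed
--     # pass 2: branch-free dict comprehension (later duplicates overwrite, as in a dict)
--     return {e: fixed.get(e, palette[rk % len(palette)]) for e, rk in zip(estate_order, ranks)}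
-- ===== Notes on version B (the rewrite author's own statement) =====
-- stated objective: alternative
-- what changed: Replaces the single stateful loop with its conditional next_idx counter by a two-pass scheme: a prefix-count scan that precomputes each position's palette rank, then a branch-free dict comprehension over zip(estate_order, ranks) using fixed.get with the palette color as default.
import Mathlib
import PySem

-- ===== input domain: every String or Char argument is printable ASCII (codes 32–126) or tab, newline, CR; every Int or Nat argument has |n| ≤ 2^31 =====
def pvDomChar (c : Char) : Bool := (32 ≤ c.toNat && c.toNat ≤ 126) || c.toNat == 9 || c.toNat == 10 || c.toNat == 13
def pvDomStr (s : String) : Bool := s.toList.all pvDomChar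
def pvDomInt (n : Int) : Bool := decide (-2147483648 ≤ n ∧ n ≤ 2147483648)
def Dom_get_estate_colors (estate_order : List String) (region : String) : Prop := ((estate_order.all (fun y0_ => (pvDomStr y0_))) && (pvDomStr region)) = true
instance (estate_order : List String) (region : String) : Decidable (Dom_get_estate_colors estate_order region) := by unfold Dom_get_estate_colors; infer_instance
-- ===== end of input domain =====

-- B replaces A's single loop with a conditional counter by a prefix-count scan plus a
-- branch-free zip comprehension (objective: alternative decomposition, same cost).

-- ===== PORT A =====
def DEFAULT_PALETTE : List String :=
  ["#d95f57", "#d3ca55", "#71d34f", "#58cfa0", "#5a95d1", "#8257d2", "#d056c0"]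

def FIXED_ESTATE_COLORS : PySem.Dict String String :=
  PySem.Dict.ofList
    [("Bearwell", "#d95f57"), ("Holyrood", "#d3ca55"), ("GreatWestern", "#71d34f"),
     ("Logie", "#58cfa0"), ("Mattakelle", "#5a95d1"), ("Palmerston", "#8257d2"),
     ("Wattegoda", "#d056c0")]

def pv_palette_for_region (region : String) : List String := DEFAULT_PALETTE

def pv_fixed_color_lookup (region : String) : PySem.Dict String String := FIXED_ESTATE_COLORS

-- A: one loop carrying (colors, next_idx); palette index always in range, so .getD "" never fires
def get_estate_colors (estate_order : List String) (region : String) : List (String × String) :=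
  let palette := pv_palette_for_region region
  let fixed := pv_fixed_color_lookup region
  let res := estate_order.foldl
    (fun (st : PySem.Dict String String × Int) estate =>
      if fixed.contains estate then
        (st.1.insert estate ((fixed.get? estate).getD ""), st.2)
      else
        (st.1.insert estate
          ((PySem.List.pyGet? palette (PySem.Int.mod st.2 (palette.length : Int))).getD ""),
         st.2 + 1))
    (PySem.Dict.empty, 0)
  res.1.items

-- ===== PORT B =====
-- B: pass 1 builds the rank list, pass 2 folds the zip into a dict via get-with-default
def get_estate_colors_alt (estate_order : List String) (region : String) : List (String × String) :=
  let palette := pv_palette_for_region region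
  let fixed := pv_fixed_color_lookup region
  let ranks := (estate_order.foldl
    (fun (st : List Int × Int) e =>
      (st.1 ++ [st.2], st.2 + (if fixed.contains e then 0 else 1)))
    ([], 0)).1
  ((estate_order.zip ranks).foldl
    (fun (d : PySem.Dict String String) p =>
      d.insert p.1 ((fixed.get? p.1).getD
        ((PySem.List.pyGet? palette (PySem.Int.mod p.2 (palette.length : Int))).getD "")))
    PySem.Dict.empty).items

-- ===== PRECONDITION & SPEC =====
def Spec_get_estate_colors (estate_order : List String) (region : String) (out : List (String × String)) : Prop := out = get_estate_colors_alt estate_order region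
instance (estate_order : List String) (region : String) (out : List (String × String)) : Decidable (Spec_get_estate_colors estate_order region out) := by unfold Spec_get_estate_colors; infer_instance

-- ===== CLAIM (what is proved, stated in full; the proofs are below) =====
def Claim_equal_get_estate_colors : Prop := ∀ (estate_order : List String) (region : String), Dom_get_estate_colors estate_order region → Spec_get_estate_colors estate_order region (get_estate_colors estate_order region)

-- ===== LEMMAS AND PROOFS =====

-- the rank sequence starting at r: r, r+δ e₀, …
def pvRk (r : Int) : List String → List Int
  | [] => []
  | e :: t => r :: pvRk (r + (if FIXED_ESTATE_COLORS.contains e then 0 else 1)) t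

theorem pvRanksFold (l : List String) : ∀ (acc : List Int) (r : Int),
    (l.foldl (fun (st : List Int × Int) e =>
      (st.1 ++ [st.2], st.2 + (if FIXED_ESTATE_COLORS.contains e then 0 else 1))) (acc, r)).1
    = acc ++ pvRk r l := by
  induction l with
  | nil => intro acc r; simp [pvRk]
  | cons e t ih => intro acc r; simp [pvRk, ih (acc ++ [r]) _]

theorem pvFoldEq (l : List String) : ∀ (d : PySem.Dict String String) (r : Int),
    (l.foldl
      (fun (st : PySem.Dict String String × Int) estate =>
        if FIXED_ESTATE_COLORS.contains estate then
          (st.1.insert estate ((FIXED_ESTATE_COLORS.get? estate).getD ""), st.2)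
        else
          (st.1.insert estate
            ((PySem.List.pyGet? DEFAULT_PALETTE (PySem.Int.mod st.2 (DEFAULT_PALETTE.length : Int))).getD ""),
           st.2 + 1)) (d, r)).1
    = (l.zip (pvRk r l)).foldl
        (fun (d : PySem.Dict String String) p =>
          d.insert p.1 ((FIXED_ESTATE_COLORS.get? p.1).getD
            ((PySem.List.pyGet? DEFAULT_PALETTE (PySem.Int.mod p.2 (DEFAULT_PALETTE.length : Int))).getD ""))) d := by
  induction l with
  | nil => intro d r; simp [pvRk]
  | cons e t ih =>
    intro d r
    by_cases h : FIXED_ESTATE_COLORS.contains e = true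
    · have hs : ∃ c, FIXED_ESTATE_COLORS.get? e = some c := by
        rcases ho : FIXED_ESTATE_COLORS.get? e with _ | c
        · rw [PySem.Dict.contains_eq_isSome_get?, ho] at h; simp at h
        · exact ⟨c, rfl⟩
      rcases hs with ⟨c, hc⟩
      simp [pvRk, h, hc, ih]
    · have hn : FIXED_ESTATE_COLORS.get? e = none := by
        rw [PySem.Dict.contains_eq_isSome_get?] at h
        rcases ho : FIXED_ESTATE_COLORS.get? e with _ | c
        · rfl
        · rw [ho] at h; simp at h
      simp [pvRk, h, hn, ih]

-- ===== VERDICT (by name: the statement is the Claim_ definition above) =====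
theorem get_estate_colors_spec : Claim_equal_get_estate_colors := by
  intro estate_order region _
  unfold Spec_get_estate_colors get_estate_colors get_estate_colors_alt
    pv_palette_for_region pv_fixed_color_lookup
  dsimp only
  rw [pvRanksFold estate_order [] 0, List.nil_append, pvFoldEq]
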